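-- pv_equiv track=rewrite | github.com/riverallzero/jbnu | programming/A10/H10.py | maximum_rainfall_event
-- ===== SOURCE A (Python) =====
-- def maximum_rainfall_event(rainfall):
--     rain_day = 0
--     rain_total = 0
--     rain_day_list = []
--     rain_total_list = []
--
--     for x in rainfall:
--         if x > 0:
--             rain_day += 1
--             rain_total += x
--         else:
--             if rain_day > 0:
--                 rain_day_list.append(rain_day)
--                 rain_total_list.append(rain_total)
--             rain_day = 0
--     if rain_day > 0:
--         rain_day_list.append(rain_day)
--         rain_total_list.append(rain_total)
--
--     return max(rain_total_list)
-- ===== SOURCE B (Python) =====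
-- def maximum_rainfall_event(rainfall):
--     return sum(x for x in rainfall if x > 0)
-- ===== Notes on version B (the rewrite author's own statement) =====
-- stated objective: simpler
-- what changed: A never resets rain_total, so the max over its run list is just the sum of all positive elements; B computes that sum in one filtered pass, dropping the run-length/run-sum lists and the final max.
-- outside the precondition, e.g. on maximum_rainfall_event([]): A raises ValueError, B returns 0
import Mathlib
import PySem

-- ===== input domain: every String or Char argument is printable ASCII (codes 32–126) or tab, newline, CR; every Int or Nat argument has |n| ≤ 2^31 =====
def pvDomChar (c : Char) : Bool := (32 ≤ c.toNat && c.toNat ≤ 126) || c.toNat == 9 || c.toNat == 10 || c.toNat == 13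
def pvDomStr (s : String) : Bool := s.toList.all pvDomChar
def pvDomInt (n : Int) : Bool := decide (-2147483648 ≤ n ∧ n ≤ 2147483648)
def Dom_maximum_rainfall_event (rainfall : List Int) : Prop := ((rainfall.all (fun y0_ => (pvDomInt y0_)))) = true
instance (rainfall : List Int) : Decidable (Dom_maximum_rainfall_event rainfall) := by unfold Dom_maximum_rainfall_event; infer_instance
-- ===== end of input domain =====

-- B replaces A's run-length/run-sum bookkeeping (whose max is always the grand total, since
-- rain_total is never reset) by a single filtered sum; return values only, no side effects.

-- ===== PORT A =====
-- state: (rain_day, rain_total, rain_day_list, rain_total_list)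
def pvStepA (st : Int × Int × List Int × List Int) (x : Int) : Int × Int × List Int × List Int :=
  let (d, t, Ld, Lt) := st
  if x > 0 then (d + 1, t + x, Ld, Lt)
  else if d > 0 then (0, t, Ld ++ [d], Lt ++ [t])
  else (0, t, Ld, Lt)

def maximum_rainfall_event (rainfall : List Int) : Int :=
  let s := rainfall.foldl pvStepA (0, 0, [], [])
  let Lt := if s.1 > 0 then s.2.2.2 ++ [s.2.1] else s.2.2.2
  -- max([]) raises ValueError in Python; those inputs are excluded by Pre_
  (PySem.List.max? Lt (fun y => y)).getD 0

-- ===== PORT B =====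
def maximum_rainfall_event_alt (rainfall : List Int) : Int :=
  (rainfall.filter (fun x => x > 0)).foldl (· + ·) 0

-- ===== PRECONDITION & SPEC =====
-- Pre_ excludes exactly the inputs with no positive element, on which A's max([]) raises ValueError.
def Pre_maximum_rainfall_event (rainfall : List Int) : Prop := ∃ x ∈ rainfall, 0 < x
instance (rainfall : List Int) : Decidable (Pre_maximum_rainfall_event rainfall) := by
  unfold Pre_maximum_rainfall_event; infer_instance
def pvWitness_maximum_rainfall_event : List Int := [3, 0, 2]

def Spec_maximum_rainfall_event (rainfall : List Int) (out : Int) : Prop := out = maximum_rainfall_event_alt rainfall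
instance (rainfall : List Int) (out : Int) : Decidable (Spec_maximum_rainfall_event rainfall out) := by unfold Spec_maximum_rainfall_event; infer_instance

-- ===== CLAIM (what is proved, stated in full; the proofs are below) =====
def Claim_equal_maximum_rainfall_event : Prop := ∀ (rainfall : List Int), Dom_maximum_rainfall_event rainfall → Pre_maximum_rainfall_event rainfall → Spec_maximum_rainfall_event rainfall (maximum_rainfall_event rainfall)

-- ===== LEMMAS AND PROOFS =====

theorem pvFoldlAdd (l : List Int) (a : Int) : l.foldl (· + ·) a = a + l.foldl (· + ·) 0 := by
  induction l generalizing a with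
  | nil => simp
  | cons x t ih =>
    simp only [List.foldl_cons]
    rw [ih (a + x), ih (0 + x)]; ring

-- possum xs = B's value on xs
def possum (xs : List Int) : Int := (xs.filter (fun x => x > 0)).foldl (· + ·) 0

theorem possum_cons_pos (x : Int) (xs : List Int) (h : 0 < x) :
    possum (x :: xs) = x + possum xs := by
  unfold possum
  rw [List.filter_cons_of_pos (by simpa using h), List.foldl_cons]
  simpa using pvFoldlAdd (xs.filter (fun x => x > 0)) (0 + x)

theorem possum_cons_nonpos (x : Int) (xs : List Int) (h : ¬ 0 < x) :
    possum (x :: xs) = possum xs := by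
  simp [possum, h]

theorem pvMaxLast (L : List Int) (t : Int) (hL : ∀ y ∈ L, y ≤ t) :
    (PySem.List.max? (L ++ [t]) (fun y => y)).getD 0 = t := by
  have hne : L ++ [t] ≠ [] := by simp
  obtain ⟨m, hm⟩ : ∃ m, PySem.List.max? (L ++ [t]) (fun y => y) = some m := by
    cases h : PySem.List.max? (L ++ [t]) (fun y => y) with
    | none => exact absurd ((PySem.List.max?_eq_none_iff _ _).mp h) hne
    | some m => exact ⟨m, rfl⟩
  have hmem : m ∈ L ++ [t] := PySem.List.max?_mem hm
  have hmax : ∀ y ∈ L ++ [t], y ≤ m := by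
    intro y hy; exact PySem.List.max?_isMax hm y hy
  have h1 : t ≤ m := hmax t (by simp)
  have h2 : m ≤ t := by
    rcases List.mem_append.mp hmem with h | h
    · exact hL m h
    · simp at h; omega
  rw [hm]; simp; omega

-- main invariant: from a state whose recorded run totals are all ≤ t, if a run is open or a
-- positive element remains, A's finish equals t plus the sum of remaining positives.
theorem pvMain (xs : List Int) (d t : Int) (Ld Lt : List Int)
    (hd0 : 0 ≤ d) (hL : ∀ y ∈ Lt, y ≤ t) (h : 0 < d ∨ ∃ x ∈ xs, 0 < x) :
    (let s := xs.foldl pvStepA (d, t, Ld, Lt)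
     let L := if s.1 > 0 then s.2.2.2 ++ [s.2.1] else s.2.2.2
     (PySem.List.max? L (fun y => y)).getD 0) = t + possum xs := by
  induction xs generalizing d t Ld Lt with
  | nil =>
    have hd : 0 < d := by
      rcases h with h | ⟨x, hx, _⟩
      · exact h
      · simp at hx
    simp only [List.foldl_nil, possum, List.filter_nil, List.foldl_nil]
    simp only [show (d > 0) = True by simp [hd]]
    simpa using pvMaxLast Lt t hL
  | cons x xs ih =>
    by_cases hx : 0 < x
    · simp only [List.foldl_cons, pvStepA, if_pos (by exact hx : x > 0)]
      rw [possum_cons_pos x xs hx]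
      have := ih (d + 1) (t + x) Ld Lt (by omega) (fun y hy => by have := hL y hy; omega) (Or.inl (by omega))
      simp only [this]; ring
    · have hx' : ¬ x > 0 := hx
      rw [possum_cons_nonpos x xs hx]
      by_cases hd : d > 0
      · simp only [List.foldl_cons, pvStepA, if_neg hx', if_pos hd]
        by_cases hpos : ∃ y ∈ xs, 0 < y
        · exact ih 0 t (Ld ++ [d]) (Lt ++ [t]) (by omega)
            (fun y hy => by rcases List.mem_append.mp hy with h | h
                            · exact hL y h
                            · simp at h; omega) (Or.inr hpos)
        · -- no run open, no positives left: fold leaves the state unchanged, result is max (Lt++[t]) = t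
          have hstay : ∀ (ys : List Int), (∀ y ∈ ys, ¬ 0 < y) → ∀ (Ld' Lt' : List Int),
              ys.foldl pvStepA (0, t, Ld', Lt') = (0, t, Ld', Lt') := by
            intro ys hys
            induction ys with
            | nil => intro _ _; rfl
            | cons z zs ihz =>
              intro Ld' Lt'
              have hz : ¬ z > 0 := hys z (List.mem_cons_self ..)
              simp only [List.foldl_cons, pvStepA, if_neg hz]
              simp only [show ¬ (0:Int) > 0 by omega, ite_false]
              exact ihz (fun y hy => hys y (List.mem_cons_of_mem _ hy)) _ _
          push Not at hpos
          rw [hstay xs (fun y hy => by have := hpos y hy; omega) _ _]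
          have hnopos : possum xs = 0 := by
            have : xs.filter (fun x => x > 0) = [] := by
              apply List.filter_eq_nil_iff.mpr
              intro y hy; simpa using (by have := hpos y hy; omega : ¬ y > 0)
            simp [possum, this]
          rw [hnopos]
          simp only [show ¬ (0:Int) > 0 by omega, ite_false]
          have := pvMaxLast Lt t hL
          simpa using this
      · have hpos : ∃ y ∈ xs, 0 < y := by
          rcases h with h | ⟨y, hy, hyp⟩
          · exact absurd h hd
          · rcases List.mem_cons.mp hy with rfl | hy'
            · exact absurd hyp hx
            · exact ⟨y, hy', hyp⟩
        simp only [List.foldl_cons, pvStepA, if_neg hx', if_neg hd]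
        exact ih 0 t Ld Lt (by omega) hL (Or.inr hpos)

-- ===== VERDICT (by name: the statement is the Claim_ definition above) =====
theorem maximum_rainfall_event_spec : Claim_equal_maximum_rainfall_event := by
  intro rainfall _ hpre
  unfold Spec_maximum_rainfall_event maximum_rainfall_event maximum_rainfall_event_alt
  have := pvMain rainfall 0 0 [] [] (by omega) (by simp) (Or.inr hpre)
  simpa [possum] using this
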